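-- pv_equiv track=rewrite | github.com/adityasunny1189/100DaysOfPython | DSA/Recursion/main.py | first_ocr_of_key
-- ===== SOURCE A (Python) =====
-- def first_ocr_of_key(arr: list, key: int) -> int:
--     if len(arr) == 0:
--         return -1
--     if arr[0] == key:
--         return 0
--     sub_prob = first_ocr_of_key(arr[1:], key)
--     if sub_prob >= 0:
--         return sub_prob + 1
--     return sub_prob
-- ===== SOURCE B (Python) =====
-- def first_ocr_of_key(arr: list, key: int) -> int:
--     for i in range(len(arr)):
--         if arr[i] == key:
--             return i
--     return -1
-- ===== Notes on version B (the rewrite author's own statement) =====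
-- stated objective: idiomatic
-- what changed: Replaced recursion over slices (which copies the tail at each step and adjusts the returned index on unwind) with a single indexed for-loop that returns the first matching index directly and -1 after the loop.
import Mathlib
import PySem

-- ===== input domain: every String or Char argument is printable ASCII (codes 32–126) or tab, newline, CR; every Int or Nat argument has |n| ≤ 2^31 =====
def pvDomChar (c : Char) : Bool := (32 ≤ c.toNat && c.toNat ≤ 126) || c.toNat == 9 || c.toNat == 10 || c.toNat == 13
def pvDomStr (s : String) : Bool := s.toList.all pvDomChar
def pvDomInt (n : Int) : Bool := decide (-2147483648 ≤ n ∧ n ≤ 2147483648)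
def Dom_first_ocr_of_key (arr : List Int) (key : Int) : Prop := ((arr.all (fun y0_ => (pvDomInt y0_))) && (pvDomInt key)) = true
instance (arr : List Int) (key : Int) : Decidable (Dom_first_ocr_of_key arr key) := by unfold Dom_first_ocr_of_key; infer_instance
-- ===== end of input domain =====

-- B replaces A's recursion over list slices with a single indexed for-loop (idiomatic linear scan); same return value everywhere.

-- ===== PORT A =====
-- A: if empty → -1; if head == key → 0; recurse on arr[1:] and add 1 to a non-negative result.
def first_ocr_of_key (arr : List Int) (key : Int) : Int :=
  match arr with
  | [] => -1
  | x :: rest =>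
    if x = key then 0
    else
      let sub_prob := first_ocr_of_key rest key
      if sub_prob ≥ 0 then sub_prob + 1 else sub_prob

-- ===== PORT B =====
-- B: for i in range(len(arr)): if arr[i] == key: return i; return -1 — ported as index recursion.
def firstOcrAltLoop (arr : List Int) (key : Int) (i : Nat) : Int :=
  if h : i < arr.length then
    if arr[i] = key then (i : Int) else firstOcrAltLoop arr key (i + 1)
  else -1
termination_by arr.length - i

def first_ocr_of_key_alt (arr : List Int) (key : Int) : Int :=
  firstOcrAltLoop arr key 0

-- ===== PRECONDITION & SPEC =====
def Spec_first_ocr_of_key (arr : List Int) (key : Int) (out : Int) : Prop := out = first_ocr_of_key_alt arr key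
instance (arr : List Int) (key : Int) (out : Int) : Decidable (Spec_first_ocr_of_key arr key out) := by unfold Spec_first_ocr_of_key; infer_instance

-- ===== CLAIM (what is proved, stated in full; the proofs are below) =====
def Claim_equal_first_ocr_of_key : Prop := ∀ (arr : List Int) (key : Int), Dom_first_ocr_of_key arr key → Spec_first_ocr_of_key arr key (first_ocr_of_key arr key)

-- ===== LEMMAS AND PROOFS =====

-- Starting the loop one cell later in a cons list shifts a found index by one.
theorem firstOcrAltLoop_cons_aux (x key : Int) (rest : List Int) :
    ∀ (n i : Nat), rest.length - i ≤ n →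
      firstOcrAltLoop (x :: rest) key (i + 1) =
        (let r := firstOcrAltLoop rest key i; if r ≥ 0 then r + 1 else r) := by
  intro n
  induction n with
  | zero =>
      intro i hn
      have hi : ¬ i < rest.length := by omega
      have hi' : ¬ i + 1 < (x :: rest).length := by simp; omega
      rw [firstOcrAltLoop.eq_def, dif_neg hi']
      rw [firstOcrAltLoop.eq_def, dif_neg hi]
      norm_num
  | succ m ih =>
      intro i hn
      by_cases hi : i < rest.length
      · have hi' : i + 1 < (x :: rest).length := by simp; omega
        rw [firstOcrAltLoop.eq_def, dif_pos hi']
        conv_rhs => rw [firstOcrAltLoop.eq_def]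
        rw [dif_pos hi]
        have hidx : (x :: rest)[i + 1]'hi' = rest[i]'hi := rfl
        rw [hidx]
        by_cases hk : rest[i]'hi = key
        · simp only [if_pos hk]
          have h0 : ((i : Int)) ≥ 0 := Int.natCast_nonneg i
          simp [h0]
        · rw [if_neg hk, if_neg hk]
          exact ih (i + 1) (by omega)
      · have hi' : ¬ i + 1 < (x :: rest).length := by simp; omega
        rw [firstOcrAltLoop.eq_def, dif_neg hi']
        rw [firstOcrAltLoop.eq_def, dif_neg hi]
        norm_num

theorem first_ocr_eq (arr : List Int) (key : Int) :
    first_ocr_of_key arr key = firstOcrAltLoop arr key 0 := by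
  induction arr with
  | nil => simp [first_ocr_of_key, firstOcrAltLoop]
  | cons x rest ih =>
      rw [firstOcrAltLoop.eq_def]
      have h0 : 0 < (x :: rest).length := by simp
      rw [dif_pos h0]
      have hidx : (x :: rest)[0]'h0 = x := rfl
      rw [hidx]
      by_cases hk : x = key
      · simp [first_ocr_of_key, hk]
      · rw [if_neg hk, firstOcrAltLoop_cons_aux x key rest rest.length 0 (by omega)]
        simp only [first_ocr_of_key, if_neg hk]
        rw [ih]

-- ===== VERDICT (by name: the statement is the Claim_ definition above) =====
theorem first_ocr_of_key_spec : Claim_equal_first_ocr_of_key := by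
  intro arr key _
  exact first_ocr_eq arr key
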